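-- pv_equiv track=rewrite | github.com/kevinmchung/AdventOfCode | 2019/Day17/Day17.py | get_long_program
-- ===== SOURCE A (Python) =====
-- def robot_coords(grid):
-- 	for r in range(len(grid)):
-- 		for c in range(len(grid[0])):
-- 			if grid[r][c] == "^":
-- 				return r, c
--
-- def get_long_program(grid):
-- 	cur_pos = list(robot_coords(grid))
-- 	cur_dir = 0
-- 	output = []
-- 	while True:
-- 		turned = False
-- 		for i in range(4):
-- 			if i != cur_dir and i != (cur_dir + 2) % 4 and \
-- 					0 <= cur_pos[0] + directions[i][0] < len(grid) and \
-- 					0 <= cur_pos[1] + directions[i][1] < len(grid[0]) and \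
-- 					grid[cur_pos[0] + directions[i][0]][cur_pos[1] + directions[i][1]] == "#":
-- 				turn = (i - cur_dir) % 4
-- 				cur_dir = i
-- 				turned = True
-- 				if turn == 3:
-- 					output.append("L")
-- 				else:
-- 					output.append("R")
-- 				break
-- 		if not turned:
-- 			break
-- 		d = 1
-- 		dr, dc = directions[cur_dir]
-- 		while 0 <= cur_pos[0] + dr * d < len(grid) and \
-- 				0 <= cur_pos[1] + dc * d < len(grid[0]) and \
-- 				grid[cur_pos[0] + dr * d][cur_pos[1] + dc * d] == "#":
-- 			d += 1
-- 		d -= 1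
-- 		output.append(str(d))
-- 		cur_pos = [cur_pos[0] + dr * d, cur_pos[1] + dc * d]
--
-- 	return output
--
-- directions = [(-1, 0), (0, 1), (1, 0), (0, -1)]
-- ===== SOURCE B (Python) =====
-- def get_long_program(grid):
-- 	DIRS = ((-1, 0), (0, 1), (1, 0), (0, -1))
-- 	rows, cols = len(grid), len(grid[0])
--
-- 	def scaffold(r, c):
-- 		return 0 <= r < rows and 0 <= c < cols and grid[r][c] == "#"
--
-- 	r, c = next((i, row.index("^")) for i, row in enumerate(grid) if "^" in row)
--
-- 	# phase 1: a flat tape of unit moves -- a turn letter, or "F" for one forward step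
-- 	tape = []
-- 	d = 0
-- 	while True:
-- 		nd = None
-- 		for i in sorted(((d + 1) % 4, (d + 3) % 4)):
-- 			if scaffold(r + DIRS[i][0], c + DIRS[i][1]):
-- 				nd = i
-- 				break
-- 		if nd is None:
-- 			break
-- 		tape.append("L" if nd == (d + 3) % 4 else "R")
-- 		d = nd
-- 		while scaffold(r + DIRS[d][0], c + DIRS[d][1]):
-- 			r += DIRS[d][0]
-- 			c += DIRS[d][1]
-- 			tape.append("F")
--
-- 	# phase 2: run-length-encode the forward steps
-- 	out = []
-- 	run = 0
-- 	for m in tape: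
-- 		if m == "F":
-- 			run += 1
-- 		else:
-- 			if out:
-- 				out.append(str(run))
-- 			out.append(m)
-- 			run = 0
-- 	if out:
-- 		out.append(str(run))
-- 	return out
-- ===== Notes on version B (the rewrite author's own statement) =====
-- stated objective: alternative
-- what changed: B records a flat tape of unit moves (turn letters and one 'F' per forward step) choosing turns by probing only the two perpendicular directions in sorted order, then compresses the forward runs in a separate run-length-encoding pass, instead of A's 4-way indexed direction scan with a multiplication jump and interleaved turn/length appends.
-- outside the precondition, e.g. on get_long_program(['^', 'ab']): A returns [], B returns []
import Mathlib
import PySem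

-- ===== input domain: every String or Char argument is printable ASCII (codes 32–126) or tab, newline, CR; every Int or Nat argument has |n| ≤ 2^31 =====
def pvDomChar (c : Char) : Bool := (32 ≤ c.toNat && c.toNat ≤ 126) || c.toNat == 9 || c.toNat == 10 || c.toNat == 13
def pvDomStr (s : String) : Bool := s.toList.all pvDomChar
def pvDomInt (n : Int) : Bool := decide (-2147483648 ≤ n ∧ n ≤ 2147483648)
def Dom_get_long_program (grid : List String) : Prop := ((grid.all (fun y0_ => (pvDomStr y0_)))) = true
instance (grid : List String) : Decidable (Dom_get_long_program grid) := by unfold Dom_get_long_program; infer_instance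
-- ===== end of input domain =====

-- B records a flat tape of unit moves (turn letters and single forward steps, chosen by probing only the
-- two perpendicular directions in sorted order) and compresses the forward runs in a separate
-- run-length-encoding pass (objective: alternative; same cost).
-- Note: a scaffold on which the walk cycles makes the Python loop forever; both ports carry an identical
-- fuel bound 4*R*C+2 (an upper bound on the iterations of any TERMINATING run, since no state may repeat)
-- purely to be total — on every input where the Python returns, the fuel is not the limiting factor.

-- ===== PORT A =====
def dirsA : List (Int × Int) := [(-1, 0), (0, 1), (1, 0), (0, -1)]

-- grid[r][c] (both indices nonnegative along A's guarded accesses)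
def cellA (grid : List String) (r c : Int) : Option Char :=
  (PySem.List.pyGet? grid r).bind fun row => PySem.Str.pyGet? row c

-- the guarded test "0 <= r < len(grid) and 0 <= c < len(grid[0]) and grid[r][c] == '#'"
def hashAtA (grid : List String) (cols r c : Int) : Bool :=
  decide (0 ≤ r) && decide (r < (grid.length : Int)) && decide (0 ≤ c) && decide (c < cols) &&
    (cellA grid r c == some '#')

def robot_coordsA (grid : List String) : Option (Int × Int) :=
  (PySem.List.pyRange 0 (grid.length : Int) 1).findSome? fun r =>
    (PySem.List.pyRange 0 (((grid.headD "").toList.length : Int)) 1).findSome? fun c =>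
      if cellA grid r c == some '^' then some (r, c) else none

-- the 'for i in range(4) … break' turn search
def turnFindA (grid : List String) (cols r c dir : Int) : Option Int :=
  (PySem.List.pyRange 0 4 1).findSome? fun i =>
    if (decide (i ≠ dir) && decide (i ≠ PySem.Int.mod (dir + 2) 4) &&
        hashAtA grid cols (r + ((PySem.List.pyGet? dirsA i).getD (0, 0)).1)
                          (c + ((PySem.List.pyGet? dirsA i).getD (0, 0)).2)) = true
    then some i else none

-- the inner 'while … : d += 1' (fueled; returns the first failing d)
def runA (grid : List String) (cols dr dc pr pc : Int) : Nat → Int → Int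
  | 0, d => d
  | f + 1, d =>
    if hashAtA grid cols (pr + dr * d) (pc + dc * d) then runA grid cols dr dc pr pc f (d + 1)
    else d

-- the outer 'while True' loop (fueled)
def loopA (grid : List String) (cols : Int) : Nat → Int → Int → Int → List String → List String
  | 0, _, _, _, out => out
  | f + 1, r, c, dir, out =>
    match turnFindA grid cols r c dir with
    | none => out
    | some i =>
      let turn := PySem.Int.mod (i - dir) 4
      let out := out ++ [if turn == 3 then "L" else "R"]
      let dd := (PySem.List.pyGet? dirsA i).getD (0, 0)
      let d := runA grid cols dd.1 dd.2 r c (grid.length + cols.toNat + 2) 1 - 1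
      loopA grid cols f (r + dd.1 * d) (c + dd.2 * d) i (out ++ [PySem.Int.toStr d])

def get_long_program (grid : List String) : List String :=
  match robot_coordsA grid with
  | none => []  -- Python raises TypeError here (outside Pre_)
  | some rc =>
    let cols : Int := ((grid.headD "").toList.length : Int)
    loopA grid cols (4 * grid.length * (grid.headD "").toList.length + 2) rc.1 rc.2 0 []

-- ===== PORT B =====
def dirsB : List (Int × Int) := [(-1, 0), (0, 1), (1, 0), (0, -1)]

-- 'for r, row in enumerate(grid): if "^" in row: (r, row.index("^")); break'
def findB (grid : List String) : Option (Int × Int) :=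
  (PySem.List.enumerate grid).findSome? fun p =>
    match PySem.List.index? p.2.toList '^' with
    | some c => some (p.1, (c : Int))
    | none => none

def scafB (grid : List String) (rows cols r c : Int) : Bool :=
  decide (0 ≤ r) && decide (r < rows) && decide (0 ≤ c) && decide (c < cols) &&
    ((PySem.List.pyGet? grid r).bind (fun row => PySem.Str.pyGet? row c) == some '#')

-- 'for i in sorted(((d+1)%4, (d+3)%4)): if scaffold(...): nd = i; break'
def chooseB (grid : List String) (rows cols r c dir : Int) : Option Int :=
  (PySem.List.sorted [PySem.Int.mod (dir + 1) 4, PySem.Int.mod (dir + 3) 4]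
      (fun x => x) false).findSome? fun i =>
    if scafB grid rows cols (r + ((PySem.List.pyGet? dirsB i).getD (0, 0)).1)
                            (c + ((PySem.List.pyGet? dirsB i).getD (0, 0)).2) = true
    then some i else none

-- the cell-by-cell walk, appending one "F" per forward step (fueled)
def walkT (grid : List String) (rows cols dr dc : Int) : Nat → Int → Int → Int × Int × List String
  | 0, r, c => (r, c, [])
  | f + 1, r, c =>
    if scafB grid rows cols (r + dr) (c + dc) then
      let w := walkT grid rows cols dr dc f (r + dr) (c + dc)
      (w.1, w.2.1, "F" :: w.2.2)
    else (r, c, [])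

-- phase 1: the tape-building loop (fueled)
def tapeB (grid : List String) (rows cols : Int) : Nat → Int → Int → Int → List String
  | 0, _, _, _ => []
  | f + 1, r, c, dir =>
    match chooseB grid rows cols r c dir with
    | none => []
    | some nd =>
      let t := if nd == PySem.Int.mod (dir + 3) 4 then "L" else "R"
      let dd := (PySem.List.pyGet? dirsB nd).getD (0, 0)
      let w := walkT grid rows cols dd.1 dd.2 (grid.length + cols.toNat + 2) r c
      t :: (w.2.2 ++ tapeB grid rows cols f w.1 w.2.1 nd)

-- 'if out: out.append(str(run))'
def flushB (st : List String × Int) : List String :=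
  if st.1.isEmpty then st.1 else st.1 ++ [PySem.Int.toStr st.2]

-- phase 2: one step of the run-length encoder
def rleStep (st : List String × Int) (m : String) : List String × Int :=
  if m == "F" then (st.1, st.2 + 1) else (flushB st ++ [m], 0)

def get_long_program_alt (grid : List String) : List String :=
  match findB grid with
  | none => []  -- Python raises StopIteration here (outside Pre_)
  | some rc =>
    let rows : Int := (grid.length : Int)
    let cols : Int := ((grid.headD "").toList.length : Int)
    flushB ((tapeB grid rows cols (4 * grid.length * (grid.headD "").toList.length + 2)
      rc.1 rc.2 0).foldl rleStep ([], 0))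

-- ===== PRECONDITION & SPEC =====
-- Pre_ keeps the natural domain: a NONEMPTY RECTANGULAR grid containing the robot '^'. Excluded are
-- grids without '^' (A raises TypeError) and ragged grids, on which whether A raises IndexError or
-- happens to return depends on the traced path (a few such grids do return, e.g. ['^', 'ab'] → []).
def Pre_get_long_program (grid : List String) : Prop :=
  (∀ row ∈ grid, row.toList.length = (grid.headD "").toList.length) ∧
    (∃ row ∈ grid, '^' ∈ row.toList)
instance (grid : List String) : Decidable (Pre_get_long_program grid) := by
  unfold Pre_get_long_program; infer_instance

def pvWitness_get_long_program : List String := ["^#.", "..."]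

def Spec_get_long_program (grid : List String) (out : List String) : Prop := out = get_long_program_alt grid
instance (grid : List String) (out : List String) : Decidable (Spec_get_long_program grid out) := by unfold Spec_get_long_program; infer_instance

-- ===== CLAIM (what is proved, stated in full; the proofs are below) =====
def Claim_equal_get_long_program : Prop := ∀ (grid : List String), Dom_get_long_program grid → Pre_get_long_program grid → Spec_get_long_program grid (get_long_program grid)

-- ===== LEMMAS AND PROOFS =====

theorem findSome?_congr_mem {α β : Type} (l : List α) (f g : α → Option β)
    (h : ∀ x ∈ l, f x = g x) : l.findSome? f = l.findSome? g := by
  induction l with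
  | nil => rfl
  | cons x xs ih =>
    simp only [List.findSome?_cons, h x List.mem_cons_self]
    cases g x with
    | none => exact ih fun y hy => h y (List.mem_cons_of_mem _ hy)
    | some b => rfl

theorem scafB_eq_hashAtA (grid : List String) (cols r c : Int) :
    scafB grid (grid.length : Int) cols r c = hashAtA grid cols r c := rfl

theorem dirsB_eq_dirsA : dirsB = dirsA := rfl

-- runA never decreases its counter
theorem runA_ge (grid : List String) (cols dr dc pr pc : Int) :
    ∀ (f : Nat) (d : Int), d ≤ runA grid cols dr dc pr pc f d := by
  intro f
  induction f with
  | zero => intro d; exact le_refl d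
  | succ f ih =>
    intro d
    simp only [runA]
    split
    · exact le_trans (by omega) (ih (d + 1))
    · exact le_refl d

-- the run/walk shift: moving the base one step forward shifts A's counter by one
theorem runA_shift (grid : List String) (cols dr dc : Int) :
    ∀ (f : Nat) (pr pc d : Int),
      runA grid cols dr dc pr pc f (d + 1) = runA grid cols dr dc (pr + dr) (pc + dc) f d + 1 := by
  intro f
  induction f with
  | zero => intro pr pc d; rfl
  | succ f ih =>
    intro pr pc d
    have harg : pr + dr * (d + 1) = (pr + dr) + dr * d := by ring
    have harg2 : pc + dc * (d + 1) = (pc + dc) + dc * d := by ring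
    simp only [runA, harg, harg2]
    split
    · rw [ih]
    · rfl

-- B's cell-by-cell walk lands on A's jump target and emits exactly A's count of "F"s
theorem walkT_eq_runA (grid : List String) (cols dr dc : Int) :
    ∀ (f : Nat) (r c : Int),
      walkT grid (grid.length : Int) cols dr dc f r c =
        (r + dr * (runA grid cols dr dc r c f 1 - 1),
         c + dc * (runA grid cols dr dc r c f 1 - 1),
         List.replicate (runA grid cols dr dc r c f 1 - 1).toNat "F") := by
  intro f
  induction f with
  | zero =>
    intro r c
    simp only [walkT, runA]
    norm_num
  | succ f ih =>
    intro r c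
    have hc : scafB grid (grid.length : Int) cols (r + dr) (c + dc)
        = hashAtA grid cols (r + dr * 1) (c + dc * 1) := by
      rw [scafB_eq_hashAtA]; norm_num
    simp only [walkT, runA, hc]
    cases hh : hashAtA grid cols (r + dr * 1) (c + dc * 1) with
    | false => simp
    | true =>
      simp only [if_true]
      rw [ih (r + dr) (c + dc)]
      have hr : runA grid cols dr dc r c f (1 + 1) = runA grid cols dr dc (r + dr) (c + dc) f 1 + 1 := by
        have := runA_shift grid cols dr dc f r c 1
        simpa using this
      rw [hr]
      have hge : (1 : Int) ≤ runA grid cols dr dc (r + dr) (c + dc) f 1 :=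
        runA_ge grid cols dr dc (r + dr) (c + dc) f 1
      have htn : (runA grid cols dr dc (r + dr) (c + dc) f 1 + 1 - 1).toNat
          = (runA grid cols dr dc (r + dr) (c + dc) f 1 - 1).toNat + 1 := by omega
      rw [htn, List.replicate_succ]
      refine Prod.ext (by ring) (Prod.ext (by ring) rfl)

-- the RLE pass just counts over a block of "F"s
theorem foldl_rleStep_replicate :
    ∀ (n : Nat) (o : List String) (run : Int),
      (List.replicate n "F").foldl rleStep (o, run) = (o, run + n) := by
  intro n
  induction n with
  | zero => intro o run; simp
  | succ n ih =>
    intro o run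
    rw [List.replicate_succ, List.foldl_cons]
    have : rleStep (o, run) "F" = (o, run + 1) := rfl
    rw [this, ih]
    refine Prod.ext rfl ?_
    push_cast
    ring

-- the two turn searches agree whenever the current direction is one of 0,1,2,3
theorem choose_eq (grid : List String) (cols r c dir : Int)
    (hdir : dir = 0 ∨ dir = 1 ∨ dir = 2 ∨ dir = 3) :
    turnFindA grid cols r c dir = chooseB grid (grid.length : Int) cols r c dir := by
  unfold turnFindA chooseB
  rcases hdir with h | h | h | h <;> subst h <;>
    rw [show PySem.List.pyRange 0 4 1 = [0, 1, 2, 3] from by decide] <;>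
    [rw [show PySem.List.sorted [PySem.Int.mod ((0:Int) + 1) 4, PySem.Int.mod ((0:Int) + 3) 4] (fun x => x) false = [1, 3] from by decide];
     rw [show PySem.List.sorted [PySem.Int.mod ((1:Int) + 1) 4, PySem.Int.mod ((1:Int) + 3) 4] (fun x => x) false = [0, 2] from by decide];
     rw [show PySem.List.sorted [PySem.Int.mod ((2:Int) + 1) 4, PySem.Int.mod ((2:Int) + 3) 4] (fun x => x) false = [1, 3] from by decide];
     rw [show PySem.List.sorted [PySem.Int.mod ((3:Int) + 1) 4, PySem.Int.mod ((3:Int) + 3) 4] (fun x => x) false = [0, 2] from by decide]] <;>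
    simp only [List.findSome?_cons, scafB_eq_hashAtA, dirsB_eq_dirsA] <;>
    norm_num [PySem.Int.mod, show Int.fmod (2:Int) 4 = 2 from by decide,
      show Int.fmod (3:Int) 4 = 3 from by decide, show Int.fmod (4:Int) 4 = 0 from by decide,
      show Int.fmod (5:Int) 4 = 1 from by decide] <;> rfl

-- the turn letters agree on the reachable (dir, nd) pairs
theorem letter_eq (dir nd : Int)
    (hdir : dir = 0 ∨ dir = 1 ∨ dir = 2 ∨ dir = 3)
    (hnd : nd = PySem.Int.mod (dir + 1) 4 ∨ nd = PySem.Int.mod (dir + 3) 4) :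
    (if (PySem.Int.mod (nd - dir) 4 == 3) = true then "L" else "R")
      = (if (nd == PySem.Int.mod (dir + 3) 4) = true then "L" else "R") := by
  rcases hdir with h | h | h | h <;> subst h <;> rcases hnd with h2 | h2 <;> subst h2 <;> decide

theorem nd_small (dir nd : Int)
    (hnd : nd = PySem.Int.mod (dir + 1) 4 ∨ nd = PySem.Int.mod (dir + 3) 4) :
    nd = 0 ∨ nd = 1 ∨ nd = 2 ∨ nd = 3 := by
  have h1a : (0 : Int) ≤ PySem.Int.mod (dir + 1) 4 := PySem.Int.mod_nonneg _ (by norm_num)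
  have h1b : PySem.Int.mod (dir + 1) 4 < 4 := PySem.Int.mod_lt _ (by norm_num)
  have h3a : (0 : Int) ≤ PySem.Int.mod (dir + 3) 4 := PySem.Int.mod_nonneg _ (by norm_num)
  have h3b : PySem.Int.mod (dir + 3) 4 < 4 := PySem.Int.mod_lt _ (by norm_num)
  rcases hnd with h | h <;> omega

-- which nd a successful chooseB can yield
theorem chooseB_mem (grid : List String) (rows cols r c dir nd : Int)
    (h : chooseB grid rows cols r c dir = some nd) :
    nd = PySem.Int.mod (dir + 1) 4 ∨ nd = PySem.Int.mod (dir + 3) 4 := by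
  unfold chooseB at h
  obtain ⟨i, hmem, hif⟩ := List.exists_of_findSome?_eq_some h
  have hi : i = nd := by
    by_cases hs : (scafB grid rows cols (r + ((PySem.List.pyGet? dirsB i).getD (0, 0)).1)
        (c + ((PySem.List.pyGet? dirsB i).getD (0, 0)).2)) = true
    · rw [if_pos hs] at hif; exact Option.some.inj hif
    · rw [if_neg hs] at hif; cases hif
  subst hi
  have := (PySem.List.mem_sorted _ _ _ _).1 hmem
  simpa using this

-- the heart: A's interleaved appends equal B's tape run-length-encoded, for any pending RLE state
theorem loop_rle (grid : List String) (cols : Int) :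
    ∀ (f : Nat) (r c dir : Int) (st : List String × Int),
      dir = 0 ∨ dir = 1 ∨ dir = 2 ∨ dir = 3 →
      flushB ((tapeB grid (grid.length : Int) cols f r c dir).foldl rleStep st)
        = loopA grid cols f r c dir (flushB st) := by
  intro f
  induction f with
  | zero => intro r c dir st _; rfl
  | succ f ih =>
    intro r c dir st hdir
    simp only [tapeB, loopA, choose_eq grid cols r c dir hdir]
    cases hch : chooseB grid (grid.length : Int) cols r c dir with
    | none => rfl
    | some nd =>
      have hnd := chooseB_mem grid (grid.length : Int) cols r c dir nd hch
      have hnd4 := nd_small dir nd hnd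
      simp only [dirsB_eq_dirsA]
      set dd := (PySem.List.pyGet? dirsA nd).getD (0, 0) with hdd
      rw [walkT_eq_runA grid cols dd.1 dd.2 (grid.length + cols.toNat + 2) r c]
      set k : Int := runA grid cols dd.1 dd.2 r c (grid.length + cols.toNat + 2) 1 - 1 with hk
      have hk0 : 0 ≤ k := by
        have := runA_ge grid cols dd.1 dd.2 r c (grid.length + cols.toNat + 2) 1
        omega
      set t := (if nd == PySem.Int.mod (dir + 3) 4 then "L" else "R") with ht
      have htF : (t == "F") = false := by
        rw [ht]; split <;> rfl
      have hstep : rleStep st t = (flushB st ++ [t], 0) := by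
        unfold rleStep; rw [htF]; rfl
      rw [List.foldl_cons, hstep, List.foldl_append, foldl_rleStep_replicate]
      have hkcast : ((0 : Int) + (k.toNat : Int)) = k := by omega
      rw [hkcast]
      rw [ih _ _ nd (flushB st ++ [t], k) hnd4]
      have hfl : flushB (flushB st ++ [t], k) = flushB st ++ [t] ++ [PySem.Int.toStr k] := by
        unfold flushB; simp
      rw [hfl, letter_eq dir nd hdir hnd, ht]

-- below: the two robot searches agree on rectangular grids
theorem inner_scan (l : List Char) :
    (PySem.List.pyRange 0 (l.length : Int) 1).findSome?
        (fun c => if (PySem.List.pyGet? l c == some '^') then some c else none)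
      = (PySem.List.index? l '^').map (fun n : Nat => (n : Int)) := by
  induction l with
  | nil => simp [PySem.List.pyRange_one_eq_nil]
  | cons x xs ih =>
    have hlen : ((x :: xs).length : Int) = (xs.length : Int) + 1 := by
      push_cast [List.length_cons]; ring
    rw [hlen, PySem.List.pyRange_one_cons (by positivity)]
    simp only [List.findSome?_cons, PySem.List.pyGet?_zero_cons]
    by_cases hx : x = '^'
    · subst hx
      rw [PySem.List.index?_cons_self]
      simp
    · have hne : ((some x : Option Char) == some '^') = false := by simp [hx]
      rw [hne]
      simp only [Bool.false_eq_true, if_false]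
      rw [PySem.List.index?_cons_of_ne _ hx]
      have hshift : PySem.List.pyRange 1 ((xs.length : Int) + 1) 1
          = (PySem.List.pyRange 0 (xs.length : Int) 1).map (fun k => k + 1) := by
        rw [PySem.List.pyRange_one, PySem.List.pyRange_one]
        simp only [List.map_map, add_sub_cancel_right, zero_add, sub_zero]
        apply List.map_congr_left
        intro k _
        exact add_comm _ _
      rw [show (0:Int)+1 = 1 from rfl, hshift, List.findSome?_map]
      have hpt : ∀ k ∈ PySem.List.pyRange 0 (xs.length : Int) 1,
          ((fun c => if (PySem.List.pyGet? (x :: xs) c == some '^') then some c else none) ∘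
            (fun k => k + 1)) k
          = (Option.map (fun c => c + 1) ∘
              (fun c => if (PySem.List.pyGet? xs c == some '^') then some c else none)) k := by
        intro k hk
        have hk' := (PySem.List.mem_pyRange_one).1 hk
        have hkn : k = ((k.toNat : Nat) : Int) := by omega
        simp only [Function.comp]
        rw [hkn, PySem.List.pyGet?_cons_succ]
        by_cases h : (PySem.List.pyGet? xs ((k.toNat : Nat) : Int) == some '^') = true <;>
          simp only [h, if_true, Bool.false_eq_true, if_false, Option.map_some, Option.map_none]
      rw [findSome?_congr_mem _ _ _ hpt, ← List.map_findSome?, ih]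
      cases PySem.List.index? xs '^' <;> simp

theorem find_eq (grid : List String)
    (hrect : ∀ row ∈ grid, row.toList.length = (grid.headD "").toList.length) :
    robot_coordsA grid = findB grid := by
  unfold robot_coordsA findB
  rw [PySem.List.enumerate_eq_map_pyRange grid "", List.findSome?_map]
  rw [show PySem.List.len grid = (grid.length : Int) from by simp [PySem.List.len_eq]]
  apply findSome?_congr_mem
  intro r hr
  have hr' := (PySem.List.mem_pyRange_one).1 hr
  have hlt : r.toNat < grid.length := by omega
  have hget : PySem.List.pyGet? grid r = some grid[r.toNat] := by
    rw [PySem.List.pyGet?_of_nonneg _ hr'.1]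
    simp [hlt]
  have hgetD : PySem.List.pyGetD grid r "" = grid[r.toNat] :=
    PySem.List.pyGetD_eq_getElem grid "" hr'.1 (by omega)
  have hmem : grid[r.toNat] ∈ grid := List.getElem_mem hlt
  have hlenrow : ((grid[r.toNat]).toList.length : Int) = ((grid.headD "").toList.length : Int) := by
    exact congrArg Nat.cast (hrect _ hmem)
  have hcell : ∀ c : Int, cellA grid r c = PySem.List.pyGet? (grid[r.toNat]).toList c := by
    intro c
    simp [cellA, hget, PySem.Str.pyGet?]
  simp only [Function.comp, hgetD]
  rw [findSome?_congr_mem _ _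
      (fun c => if (PySem.List.pyGet? (grid[r.toNat]).toList c == some '^') then some (r, c) else none)
      (by intro c _; rw [hcell])]
  have hmapped : (fun c : Int => if (PySem.List.pyGet? (grid[r.toNat]).toList c == some '^')
        then some (r, c) else none)
      = (Option.map (fun c => (r, c)) ∘
          (fun c => if (PySem.List.pyGet? (grid[r.toNat]).toList c == some '^') then some c else none)) := by
    funext c
    by_cases h : (PySem.List.pyGet? (grid[r.toNat]).toList c == some '^') = true <;>
      simp only [h, Function.comp, Option.map_some, Bool.false_eq_true, if_true, if_false,
        Option.map_none]
  rw [← hlenrow, hmapped, ← List.map_findSome?, inner_scan]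
  cases PySem.List.index? (grid[r.toNat]).toList '^' <;> simp

-- ===== VERDICT (by name: the statement is the Claim_ definition above) =====
theorem get_long_program_spec : Claim_equal_get_long_program := by
  intro grid _hdom hpre
  unfold Spec_get_long_program
  unfold get_long_program get_long_program_alt
  rw [find_eq grid hpre.1]
  cases h : findB grid with
  | none => rfl
  | some rc =>
    simp only []
    exact (loop_rle grid ((grid.headD "").toList.length : Int)
      (4 * grid.length * (grid.headD "").toList.length + 2) rc.1 rc.2 0 ([], 0) (Or.inl rfl)).symm
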